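-- pv_equiv track=rewrite | github.com/tayyabahussain98/AIDD_30_Days_Challenge | Task_04/study_notes_agent/app.py | format_quiz
-- ===== SOURCE A (Python) =====
-- def format_quiz(text):
--     if not text:
--         return ""
--
--     lines = text.split("\n")
--     formatted = ""
--     question_block = []
--
--     for line in lines:
--         clean = line.strip()
--
--         # Question line
--         if clean.lower().startswith(("q", "question")):
--             if question_block:
--                 formatted += "\n".join(question_block)
--                 formatted += "\n" + ("-" * 60) + "\n\n"
--                 question_block = []
--             question_block.append(clean)
--
--         # Options
--         elif any(clean.startswith(opt) for opt in ["A", "B", "C", "D"]):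
--             question_block.append("  " + clean)
--
--         # Correct Answer
--         elif "correct" in clean.lower():
--             question_block.append("\n" + clean)
--
--     # Add last question
--     if question_block:
--         formatted += "\n".join(question_block)
--
--     return formatted
-- ===== SOURCE B (Python) =====
-- def format_quiz(text):
--     if not text:
--         return ""
--
--     def render(line):
--         clean = line.strip()
--         low = clean.lower()
--         if low.startswith("q"):
--             return clean, True
--         if clean.startswith(("A", "B", "C", "D")):
--             return "  " + clean, False
--         if "correct" in low:
--             return "\n" + clean, False
--         return None
--
--     kept = [r for r in map(render, text.split("\n")) if r is not None]
--     sep = "\n" + "-" * 60 + "\n\n"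
--     return "".join(
--         ("" if i == 0 else sep if is_q else "\n") + s
--         for i, (s, is_q) in enumerate(kept)
--     )
-- ===== Notes on version B (the rewrite author's own statement) =====
-- stated objective: alternative
-- what changed: B replaces A's stateful block accumulator with flush-on-question by two stages: classify every line into an optional (rendered, is_question) tag, then emit one flat join where each kept item after the first carries either the dashed separator (question) or a newline prefix -- no block list or flush logic at all.
import Mathlib
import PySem

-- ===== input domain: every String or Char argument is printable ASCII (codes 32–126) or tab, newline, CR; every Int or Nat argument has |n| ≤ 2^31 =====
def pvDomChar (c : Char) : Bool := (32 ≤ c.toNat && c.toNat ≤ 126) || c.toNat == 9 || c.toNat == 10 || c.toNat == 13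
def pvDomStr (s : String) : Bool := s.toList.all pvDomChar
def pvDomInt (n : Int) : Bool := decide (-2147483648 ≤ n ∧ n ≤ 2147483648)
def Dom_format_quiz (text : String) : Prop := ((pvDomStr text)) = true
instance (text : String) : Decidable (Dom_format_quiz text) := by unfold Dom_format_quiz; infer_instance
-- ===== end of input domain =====

-- B replaces A's stateful block accumulator (flush-on-question) by two stages: classify every
-- line into an optional (rendered, is_question) tag, then one flat join with a per-item
-- computed prefix (objective: alternative).


-- "\n" + "-"*60 + "\n\n"  (used verbatim by both Pythons)
def pvSep : List Char := ['\n'] ++ List.replicate 60 '-' ++ ['\n', '\n']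

-- ===== PORT A =====
-- A's loop body: state = (formatted, question_block)
def pvAStep (st : List Char × List (List Char)) (line : List Char) :
    List Char × List (List Char) :=
  let clean := PySem.Chars.strip line
  if PySem.Chars.startswith (PySem.Chars.lower clean) ['q'] ||
     PySem.Chars.startswith (PySem.Chars.lower clean) ['q','u','e','s','t','i','o','n'] then
    let st' := if st.2 ≠ [] then
        (st.1 ++ PySem.Chars.join ['\n'] st.2 ++ pvSep, ([] : List (List Char)))
      else st
    (st'.1, st'.2 ++ [clean])
  else if [['A'], ['B'], ['C'], ['D']].any (fun opt => PySem.Chars.startswith clean opt) then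
    (st.1, st.2 ++ [' ' :: ' ' :: clean])
  else if PySem.Chars.isIn ['c','o','r','r','e','c','t'] (PySem.Chars.lower clean) then
    (st.1, st.2 ++ ['\n' :: clean])
  else st

def format_quiz (text : String) : String :=
  if text.toList = [] then "" else
  let lines := PySem.Chars.splitOn text.toList ['\n']
  let st := lines.foldl pvAStep ([], [])
  String.ofList (if st.2 ≠ [] then st.1 ++ PySem.Chars.join ['\n'] st.2 else st.1)

-- ===== PORT B =====
-- B's `render`: classify a raw line into (formatted text, is_question), or none (dropped)
def pvRender (line : List Char) : Option (List Char × Bool) :=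
  let clean := PySem.Chars.strip line
  let low := PySem.Chars.lower clean
  if PySem.Chars.startswith low ['q'] then some (clean, true)
  else if PySem.Chars.startswith clean ['A'] || (PySem.Chars.startswith clean ['B'] ||
          (PySem.Chars.startswith clean ['C'] || PySem.Chars.startswith clean ['D'])) then
    some (' ' :: ' ' :: clean, false)
  else if PySem.Chars.isIn ['c','o','r','r','e','c','t'] low then some ('\n' :: clean, false)
  else none

-- B's join: items after the first carry the separator (question) or a newline prefix
def pvEmitRest : List (List Char × Bool) → List Char
  | [] => []
  | (s, q) :: rest => (if q then pvSep else ['\n']) ++ s ++ pvEmitRest rest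

def pvEmit : List (List Char × Bool) → List Char
  | [] => []
  | (s, _) :: rest => s ++ pvEmitRest rest

def format_quiz_alt (text : String) : String :=
  if text.toList = [] then "" else
  let kept := (PySem.Chars.splitOn text.toList ['\n']).filterMap pvRender
  String.ofList (pvEmit kept)

-- ===== PRECONDITION & SPEC =====
def Spec_format_quiz (text : String) (out : String) : Prop := out = format_quiz_alt text
instance (text : String) (out : String) : Decidable (Spec_format_quiz text out) := by unfold Spec_format_quiz; infer_instance

-- ===== CLAIM (what is proved, stated in full; the proofs are below) =====
def Claim_equal_format_quiz : Prop := ∀ (text : String), Dom_format_quiz text → Spec_format_quiz text (format_quiz text)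

-- ===== LEMMAS AND PROOFS =====

-- the invariant linking A's state to B's kept list
def pvH (fmt : List Char) (block : List (List Char)) (kept : List (List Char × Bool)) : Prop :=
  (block = [] → fmt = [] ∧ kept = []) ∧
  (block ≠ [] → kept ≠ [] ∧ fmt ++ PySem.Chars.join ['\n'] block = pvEmit kept)

lemma pv_q_collapse (s : List Char) :
    (PySem.Chars.startswith s ['q'] ||
     PySem.Chars.startswith s ['q','u','e','s','t','i','o','n'])
    = PySem.Chars.startswith s ['q'] := by
  cases h : PySem.Chars.startswith s ['q'] with
  | true => simp
  | false =>
      simp only [Bool.false_or]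
      cases h2 : PySem.Chars.startswith s ['q','u','e','s','t','i','o','n'] with
      | false => rfl
      | true =>
          exact absurd ((PySem.Chars.startswith_iff _ _).mpr
            ((show ['q'] <+: ['q','u','e','s','t','i','o','n'] by decide).trans
              ((PySem.Chars.startswith_iff _ _).mp h2)))
            (by simp [h])

lemma pv_join_cons_of_ne (sep a : List Char) (l : List (List Char)) (h : l ≠ []) :
    PySem.Chars.join sep (a :: l) = a ++ sep ++ PySem.Chars.join sep l := by
  cases l with
  | nil => exact absurd rfl h
  | cons q rest => exact PySem.Chars.join_cons_cons sep a q rest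

lemma pv_join_snoc (sep y : List Char) (l : List (List Char)) (h : l ≠ []) :
    PySem.Chars.join sep (l ++ [y]) = PySem.Chars.join sep l ++ sep ++ y := by
  induction l with
  | nil => exact absurd rfl h
  | cons a l ih =>
      cases l with
      | nil => simp [PySem.Chars.join_cons_cons, PySem.Chars.join_singleton]
      | cons b t =>
          rw [List.cons_append, pv_join_cons_of_ne sep a ((b :: t) ++ [y]) (by simp),
              ih (by simp), pv_join_cons_of_ne sep a (b :: t) (by simp)]
          simp

lemma pvEmitRest_snoc (l : List (List Char × Bool)) (s : List Char) (q : Bool) :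
    pvEmitRest (l ++ [(s, q)]) = pvEmitRest l ++ (if q then pvSep else ['\n']) ++ s := by
  induction l with
  | nil => simp [pvEmitRest]
  | cons a t ih => cases a; simp [pvEmitRest, ih]

lemma pvEmit_snoc (l : List (List Char × Bool)) (s : List Char) (q : Bool) (h : l ≠ []) :
    pvEmit (l ++ [(s, q)]) = pvEmit l ++ (if q then pvSep else ['\n']) ++ s := by
  cases l with
  | nil => exact absurd rfl h
  | cons a t => cases a; simp [pvEmit, pvEmitRest_snoc]

lemma pvStep_rel (line : List Char) (fmt : List Char)
    (block : List (List Char)) (kept : List (List Char × Bool)) (hH : pvH fmt block kept) :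
    pvH (pvAStep (fmt, block) line).1 (pvAStep (fmt, block) line).2
        (kept ++ (pvRender line).toList) := by
  obtain ⟨hE, hN⟩ := hH
  simp only [pvAStep, pvRender, pv_q_collapse, List.any_cons, List.any_nil, Bool.or_false]
  cases h1 : PySem.Chars.startswith (PySem.Chars.lower (PySem.Chars.strip line)) ['q'] with
  | true =>
      simp only [reduceIte]
      by_cases hb : block = []
      · obtain ⟨hf, hk⟩ := hE hb
        rw [if_neg (not_not_intro hb)]
        refine ⟨fun h => absurd h (by simp [hb]), fun _ => ?_⟩
        simp [hb, hf, hk, pvEmit, pvEmitRest, PySem.Chars.join_singleton]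
      · obtain ⟨hk, hfe⟩ := hN hb
        rw [if_pos hb]
        refine ⟨fun h => absurd h (by simp), fun _ => ⟨by simp, ?_⟩⟩
        simp only [Option.toList_some]
        rw [pvEmit_snoc _ _ _ hk]
        simp [← hfe, PySem.Chars.join_singleton]
  | false =>
      simp only [Bool.false_eq_true, if_false]
      cases h2 : (PySem.Chars.startswith (PySem.Chars.strip line) ['A'] ||
          (PySem.Chars.startswith (PySem.Chars.strip line) ['B'] ||
          (PySem.Chars.startswith (PySem.Chars.strip line) ['C'] ||
          PySem.Chars.startswith (PySem.Chars.strip line) ['D']))) with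
      | true =>
          simp only [reduceIte]
          by_cases hb : block = []
          · obtain ⟨hf, hk⟩ := hE hb
            refine ⟨fun h => absurd h (by simp), fun _ => ?_⟩
            simp [hb, hf, hk, pvEmit, pvEmitRest, PySem.Chars.join_singleton]
          · obtain ⟨hk, hfe⟩ := hN hb
            refine ⟨fun h => absurd h (by simp [hb]), fun _ => ⟨by simp [hk], ?_⟩⟩
            simp only [Option.toList_some]
            rw [pvEmit_snoc _ _ _ hk, pv_join_snoc _ _ _ hb]
            simp [← hfe]
      | false =>
          simp only [Bool.false_eq_true, if_false]
          cases h3 : PySem.Chars.isIn ['c','o','r','r','e','c','t']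
              (PySem.Chars.lower (PySem.Chars.strip line)) with
          | true =>
              simp only [reduceIte]
              by_cases hb : block = []
              · obtain ⟨hf, hk⟩ := hE hb
                refine ⟨fun h => absurd h (by simp), fun _ => ?_⟩
                simp [hb, hf, hk, pvEmit, pvEmitRest, PySem.Chars.join_singleton]
              · obtain ⟨hk, hfe⟩ := hN hb
                refine ⟨fun h => absurd h (by simp [hb]), fun _ => ⟨by simp [hk], ?_⟩⟩
                simp only [Option.toList_some]
                rw [pvEmit_snoc _ _ _ hk, pv_join_snoc _ _ _ hb]
                simp [← hfe]
          | false =>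
              simp only [Bool.false_eq_true, if_false, Option.toList_none, List.append_nil]
              exact ⟨hE, hN⟩

lemma pvFold_rel : ∀ (lines : List (List Char)) (fmt : List Char)
    (block : List (List Char)) (kept : List (List Char × Bool)), pvH fmt block kept →
    pvH (lines.foldl pvAStep (fmt, block)).1 (lines.foldl pvAStep (fmt, block)).2
        (kept ++ lines.filterMap pvRender) := by
  intro lines
  induction lines with
  | nil => intro fmt block kept hH; simpa using hH
  | cons line rest ih =>
      intro fmt block kept hH
      have h := ih (pvAStep (fmt, block) line).1 (pvAStep (fmt, block) line).2
        (kept ++ (pvRender line).toList) (pvStep_rel line fmt block kept hH)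
      cases hr : pvRender line with
      | none => simpa [List.filterMap_cons, hr] using h
      | some v => simpa [List.filterMap_cons, hr] using h

-- ===== VERDICT (by name: the statement is the Claim_ definition above) =====
theorem format_quiz_spec : Claim_equal_format_quiz := by
  unfold Claim_equal_format_quiz
  intro text _
  unfold Spec_format_quiz format_quiz format_quiz_alt
  by_cases hE : text.toList = []
  · simp [hE]
  · simp only [hE, if_false]
    have h := pvFold_rel (PySem.Chars.splitOn text.toList ['\n']) [] [] []
      ⟨fun _ => ⟨rfl, rfl⟩, fun h => absurd rfl h⟩
    set st := (PySem.Chars.splitOn text.toList ['\n']).foldl pvAStep ([], []) with hst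
    obtain ⟨hBe, hBn⟩ := h
    by_cases hb : st.2 = []
    · obtain ⟨hf, hk⟩ := hBe hb
      simp only [List.nil_append] at hk
      rw [if_neg (not_not_intro hb), hf, hk]
      rfl
    · obtain ⟨hk, hfe⟩ := hBn hb
      rw [if_pos hb, hfe]
      simp
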